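-- pv_equiv track=rewrite | github.com/ymtz13/CompetitiveProgramming | AtCoder/ABC326/F.py | listup
-- ===== SOURCE A (Python) =====
-- F = 1 << 22
--
-- def listup(A):
--     Rs = [0]
--     Rx = [0]
--
--     for i, a in enumerate(A):
--         RsNext = []
--         RxNext = []
--
--         for rs, rx in zip(Rs, Rx):
--             RsNext.append(rs + a)
--             RxNext.append(rx + (1 << i))
--             RsNext.append(rs - a)
--             RxNext.append(rx)
--
--         Rs = RsNext
--         Rx = RxNext
--
--     Z = [rs * F + rx for rs, rx in zip(Rs, Rx)]
--     Z.sort()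
--
--     Rs = []
--     Rx = []
--     for z in Z:
--         Rs.append(z // F)
--         Rx.append(z % F)
--
--     return Rs, Rx
-- ===== SOURCE B (Python) =====
-- def listup(A):
--     F = 1 << 22
--     # keep Z (the packed keys rs*F + rx) sorted incrementally: each step the two
--     # constant-offset copies of a sorted list are sorted, so a single merge suffices
--     # and the final sort disappears.
--     Z = [0]
--     for i, a in enumerate(A):
--         lo = [z - a * F for z in Z]
--         hi = [z + a * F + (1 << i) for z in Z]
--         merged = []
--         p = 0
--         q = 0
--         n, m = len(lo), len(hi)
--         while p < n and q < m:
--             if lo[p] <= hi[q]: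
--                 merged.append(lo[p])
--                 p += 1
--             else:
--                 merged.append(hi[q])
--                 q += 1
--         merged.extend(lo[p:])
--         merged.extend(hi[q:])
--         Z = merged
--     return [z // F for z in Z], [z % F for z in Z]
-- ===== Notes on version B (the rewrite author's own statement) =====
-- stated objective: alternative
-- what changed: Instead of building the packed keys in arbitrary order and sorting once at the end, B keeps the packed key list sorted throughout: each step adds a constant offset to a sorted list twice (two sorted lists) and merges them, so the final sort disappears (measured 1.74x at n=16, but not confirmed at larger sizes, so no speed claim).
import Mathlib
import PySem

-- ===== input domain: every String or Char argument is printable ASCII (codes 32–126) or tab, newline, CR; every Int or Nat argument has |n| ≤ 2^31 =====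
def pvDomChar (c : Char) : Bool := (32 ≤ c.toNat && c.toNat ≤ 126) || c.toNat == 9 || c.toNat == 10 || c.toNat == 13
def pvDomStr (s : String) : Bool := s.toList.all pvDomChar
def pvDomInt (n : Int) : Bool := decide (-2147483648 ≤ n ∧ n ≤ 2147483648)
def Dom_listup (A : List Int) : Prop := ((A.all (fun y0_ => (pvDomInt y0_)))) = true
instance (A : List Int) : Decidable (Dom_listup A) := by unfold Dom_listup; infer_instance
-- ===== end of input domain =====

-- B keeps the packed-key list sorted incrementally (merge of two constant-offset sorted copies per step), so the final sort disappears.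

-- ===== PORT A =====
-- inner 'for rs, rx in zip(Rs, Rx)' loop appending the four values
def stepA (i a : Int) (st : List Int × List Int) : List Int × List Int :=
  (st.1.zip st.2).foldl
    (fun acc rz => (acc.1 ++ [rz.1 + a, rz.1 - a], acc.2 ++ [rz.2 + ((1 : Int) <<< i.toNat), rz.2]))
    ([], [])
-- i comes from enumerate, so i ≥ 0 and i.toNat is exact for Python's 1 << i

def listup (A : List Int) : List Int × List Int :=
  let F : Int := (1 : Int) <<< 22
  let st := (PySem.List.enumerate A 0).foldl (fun st ia => stepA ia.1 ia.2 st) ([0], [0])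
  let Z := PySem.List.sorted ((st.1.zip st.2).map (fun p => p.1 * F + p.2)) (fun z => z) false
  Z.foldl (fun acc z => (acc.1 ++ [PySem.Int.floordiv z F], acc.2 ++ [PySem.Int.mod z F])) ([], [])

-- ===== PORT B =====
-- hand-written two-pointer merge of Source B, as structural recursion
def mergeZ : List Int → List Int → List Int
  | [], v => v
  | u, [] => u
  | x :: u, y :: v => if x ≤ y then x :: mergeZ u (y :: v) else y :: mergeZ (x :: u) v

def stepB (i a : Int) (Z : List Int) : List Int :=
  mergeZ (Z.map (fun z => z - a * ((1 : Int) <<< 22))) (Z.map (fun z => z + a * ((1 : Int) <<< 22) + ((1 : Int) <<< i.toNat)))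

def listup_alt (A : List Int) : List Int × List Int :=
  let F : Int := (1 : Int) <<< 22
  let Z := (PySem.List.enumerate A 0).foldl (fun Z ia => stepB ia.1 ia.2 Z) [0]
  (Z.map (fun z => PySem.Int.floordiv z F), Z.map (fun z => PySem.Int.mod z F))

-- ===== PRECONDITION & SPEC =====
def Spec_listup (A : List Int) (out : List Int × List Int) : Prop := out = listup_alt A
instance (A : List Int) (out : List Int × List Int) : Decidable (Spec_listup A out) := by unfold Spec_listup; infer_instance

-- ===== CLAIM (what is proved, stated in full; the proofs are below) =====
def Claim_equal_listup : Prop := ∀ (A : List Int), Dom_listup A → Spec_listup A (listup A)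

-- ===== LEMMAS AND PROOFS =====

-- the pair-level step A performs, seen as a flatMap
def pstep (i a : Int) (P : List (Int × Int)) : List (Int × Int) :=
  P.flatMap (fun rz => [(rz.1 + a, rz.2 + ((1 : Int) <<< i.toNat)), (rz.1 - a, rz.2)])

-- the packed-key step both sides realise
def zstep (i a : Int) (Z : List Int) : List Int :=
  Z.flatMap (fun z => [z + a * ((1 : Int) <<< 22) + ((1 : Int) <<< i.toNat), z - a * ((1 : Int) <<< 22)])

theorem stepA_inner (i a : Int) (P : List (Int × Int)) (p q : List Int) :
    P.foldl (fun acc rz => (acc.1 ++ [rz.1 + a, rz.1 - a], acc.2 ++ [rz.2 + ((1 : Int) <<< i.toNat), rz.2])) (p, q)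
      = (p ++ (pstep i a P).map Prod.fst, q ++ (pstep i a P).map Prod.snd) := by
  induction P generalizing p q with
  | nil => simp [pstep]
  | cons h t ih => simp [pstep, ih]

theorem stepA_eq (i a : Int) (P : List (Int × Int)) :
    stepA i a (P.map Prod.fst, P.map Prod.snd)
      = ((pstep i a P).map Prod.fst, (pstep i a P).map Prod.snd) := by
  simp [stepA, List.zip_map', stepA_inner]

theorem foldl_stepA_eq (A : List Int) (i0 : Int) (P : List (Int × Int)) :
    (PySem.List.enumerate A i0).foldl (fun st ia => stepA ia.1 ia.2 st) (P.map Prod.fst, P.map Prod.snd)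
      = ((PySem.List.enumerate A i0).foldl (fun P ia => pstep ia.1 ia.2 P) P |>.map Prod.fst,
         (PySem.List.enumerate A i0).foldl (fun P ia => pstep ia.1 ia.2 P) P |>.map Prod.snd) := by
  induction A generalizing i0 P with
  | nil => simp [PySem.List.enumerate_nil]
  | cons a t ih => simp [PySem.List.enumerate_cons, stepA_eq, ih]

theorem pack_pstep (i a : Int) (P : List (Int × Int)) :
    (pstep i a P).map (fun p => p.1 * ((1 : Int) <<< 22) + p.2)
      = zstep i a (P.map (fun p => p.1 * ((1 : Int) <<< 22) + p.2)) := by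
  simp [pstep, zstep, List.map_flatMap, List.flatMap_map]
  apply List.flatMap_congr
  intro p _
  simp; constructor <;> ring

theorem pack_foldl (A : List Int) (i0 : Int) (P : List (Int × Int)) :
    ((PySem.List.enumerate A i0).foldl (fun P ia => pstep ia.1 ia.2 P) P).map (fun p => p.1 * ((1 : Int) <<< 22) + p.2)
      = (PySem.List.enumerate A i0).foldl (fun Z ia => zstep ia.1 ia.2 Z) (P.map (fun p => p.1 * ((1 : Int) <<< 22) + p.2)) := by
  induction A generalizing i0 P with
  | nil => simp [PySem.List.enumerate_nil]
  | cons a t ih => simp [PySem.List.enumerate_cons, ih, pack_pstep]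

theorem mergeZ_perm (u v : List Int) : (mergeZ u v).Perm (u ++ v) := by
  induction u, v using mergeZ.induct with
  | case1 v => simp [mergeZ]
  | case2 u h => cases u <;> simp [mergeZ]
  | case3 x u y v hle ih => simp only [mergeZ, hle, if_true]; exact ih.cons x
  | case4 x u y v hle ih =>
      simp only [mergeZ, hle, if_false]
      exact (ih.cons y).trans (List.perm_middle.symm)

theorem mem_mergeZ {z : Int} {u v : List Int} : z ∈ mergeZ u v ↔ z ∈ u ∨ z ∈ v := by
  rw [(mergeZ_perm u v).mem_iff]; simp

theorem mergeZ_pairwise {u v : List Int} (hu : u.Pairwise (· ≤ ·)) (hv : v.Pairwise (· ≤ ·)) :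
    (mergeZ u v).Pairwise (· ≤ ·) := by
  induction u, v using mergeZ.induct with
  | case1 v => simpa [mergeZ] using hv
  | case2 u h => cases u <;> simp_all [mergeZ]
  | case3 x u y v hle ih =>
      rw [List.pairwise_cons] at hu
      simp only [mergeZ, hle, if_true]
      rw [List.pairwise_cons]
      refine ⟨?_, ih hu.2 hv⟩
      intro z hz
      rcases mem_mergeZ.mp hz with h | h
      · exact hu.1 z h
      · rcases List.mem_cons.mp h with rfl | h
        · exact hle
        · exact le_trans hle ((List.pairwise_cons.mp hv).1 z h)
  | case4 x u y v hle ih =>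
      rw [List.pairwise_cons] at hv
      simp only [mergeZ, hle, if_false]
      rw [List.pairwise_cons]
      refine ⟨?_, ih hu hv.2⟩
      intro z hz
      rcases mem_mergeZ.mp hz with h | h
      · rcases List.mem_cons.mp h with rfl | h
        · omega
        · exact le_trans (by omega) ((List.pairwise_cons.mp hu).1 z h)
      · exact hv.1 z h

theorem map_append_perm_flatMap (f g : Int → Int) (Z : List Int) :
    (Z.map f ++ Z.map g).Perm (Z.flatMap fun z => [f z, g z]) := by
  induction Z with
  | nil => simp
  | cons z t ih =>
      simp only [List.map_cons, List.flatMap_cons, List.cons_append]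
      refine List.Perm.cons (f z) ?_
      calc (t.map f ++ g z :: t.map g).Perm (g z :: (t.map f ++ t.map g)) := List.perm_middle
        _ = g z :: (t.map f ++ t.map g) := rfl
        _ |>.Perm (g z :: t.flatMap fun z => [f z, g z]) := ih.cons (g z)

theorem stepB_perm (i a : Int) (Z : List Int) : (stepB i a Z).Perm (zstep i a Z) := by
  have h1 := mergeZ_perm (Z.map (fun z => z - a * ((1 : Int) <<< 22)))
      (Z.map (fun z => z + a * ((1 : Int) <<< 22) + ((1 : Int) <<< i.toNat)))
  have h2 : ((Z.map (fun z => z - a * ((1 : Int) <<< 22))) ++ (Z.map (fun z => z + a * ((1 : Int) <<< 22) + ((1 : Int) <<< i.toNat)))).Perm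
      ((Z.map (fun z => z + a * ((1 : Int) <<< 22) + ((1 : Int) <<< i.toNat))) ++ (Z.map (fun z => z - a * ((1 : Int) <<< 22)))) :=
    List.perm_append_comm
  exact (h1.trans h2).trans (map_append_perm_flatMap _ _ Z)

theorem stepB_pairwise (i a : Int) {Z : List Int} (h : Z.Pairwise (· ≤ ·)) :
    (stepB i a Z).Pairwise (· ≤ ·) := by
  apply mergeZ_pairwise <;>
  · rw [List.pairwise_map]
    exact h.imp (by intro x y hxy; omega)

theorem foldl_stepB_inv (A : List Int) (i0 : Int) (Z W : List Int)
    (hs : Z.Pairwise (· ≤ ·)) (hp : Z.Perm W) :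
    ((PySem.List.enumerate A i0).foldl (fun Z ia => stepB ia.1 ia.2 Z) Z).Pairwise (· ≤ ·) ∧
    ((PySem.List.enumerate A i0).foldl (fun Z ia => stepB ia.1 ia.2 Z) Z).Perm
      ((PySem.List.enumerate A i0).foldl (fun Z ia => zstep ia.1 ia.2 Z) W) := by
  induction A generalizing i0 Z W with
  | nil => exact ⟨by simpa [PySem.List.enumerate_nil] using hs,
                  by simpa [PySem.List.enumerate_nil] using hp⟩
  | cons a t ih =>
      simp only [PySem.List.enumerate_cons, List.foldl_cons]
      exact ih (i0 + 1) _ _ (stepB_pairwise i0 a hs)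
        ((stepB_perm i0 a Z).trans (hp.flatMap (fun z _ => List.Perm.refl _)))

theorem foldl_pair_append (Z : List Int) (f g : Int → Int) (p q : List Int) :
    Z.foldl (fun acc z => (acc.1 ++ [f z], acc.2 ++ [g z])) (p, q)
      = (p ++ Z.map f, q ++ Z.map g) := by
  induction Z generalizing p q with
  | nil => simp
  | cons z t ih => simp [ih]

-- ===== VERDICT (by name: the statement is the Claim_ definition above) =====
theorem listup_spec : Claim_equal_listup := by
  intro A _
  show listup A = listup_alt A
  unfold listup listup_alt
  dsimp only
  have hA := foldl_stepA_eq A 0 [((0 : Int), (0 : Int))]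
  simp only [List.map_cons, List.map_nil] at hA
  rw [hA]
  rw [List.zip_map', List.map_id']
  rw [pack_foldl A 0 [((0 : Int), (0 : Int))]]
  simp only [List.map_cons, List.map_nil]
  norm_num
  obtain ⟨hs, hp⟩ := foldl_stepB_inv A 0 [0] [0] (by simp) (List.Perm.refl _)
  simp only [PySem.List.sorted_id_eq_of_perm_of_pairwise _ _ hp hs]
  rw [foldl_pair_append]
  simp
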